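-- pv_equiv track=rewrite | github.com/collinwarner/Random_Walks_Z-2 | walks.py | out_before
-- ===== SOURCE A (Python) =====
-- def out_before(s, b):
--     # 00 -> u 01 -> d,10 -> l, 01 -> r
--     pos = 0
--     for i in range(0, len(s)-2, 2):
--         if s[i:i+2] == '00':
--             pos += 1
--         elif s[i:i+2] == '01':
--             pos -= 1
--
--         if pos >= b:
--             return True
--
--     return False
-- ===== SOURCE B (Python) =====
-- def out_before(s, b):
--     # Back-to-front fold: m is the maximum over nonempty prefix sums of the
--     # chunk-delta sequence starting at index i (None for the empty sequence),
--     # via the recurrence M(d::ds) = max(d, d + M(ds)).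
--     # A's loop returns True iff some running position >= b, i.e. iff that
--     # maximum prefix sum is >= b.
--     m = None
--     for i in reversed(range(0, len(s) - 2, 2)):
--         c = s[i:i+2]
--         d = 1 if c == '00' else (-1 if c == '01' else 0)
--         m = d if m is None else max(d, d + m)
--     return m is not None and m >= b
-- ===== Notes on version B (the rewrite author's own statement) =====
-- stated objective: alternative
-- what changed: Instead of scanning forward with a running position and early exit, B traverses the chunk indices in reverse and computes the maximum nonempty-prefix sum of the delta sequence via the right-fold recurrence M(d::ds)=max(d,d+M(ds)), then compares that maximum with b once.
import Mathlib
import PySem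

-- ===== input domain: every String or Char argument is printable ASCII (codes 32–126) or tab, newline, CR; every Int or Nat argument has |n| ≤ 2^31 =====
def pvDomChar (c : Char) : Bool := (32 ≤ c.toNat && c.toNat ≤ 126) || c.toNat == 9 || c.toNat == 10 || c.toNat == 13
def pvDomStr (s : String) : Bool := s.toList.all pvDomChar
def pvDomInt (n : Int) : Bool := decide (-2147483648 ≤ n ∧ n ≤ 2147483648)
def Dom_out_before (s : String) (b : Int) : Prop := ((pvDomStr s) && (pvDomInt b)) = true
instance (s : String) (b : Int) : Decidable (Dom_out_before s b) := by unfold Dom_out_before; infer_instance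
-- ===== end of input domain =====

-- B replaces A's forward early-exit position scan by a reverse fold computing the maximum
-- nonempty-prefix sum of the chunk deltas (M(d::ds)=max(d,d+M(ds))); objective: alternative, same cost.


-- ===== PORT A =====
-- A's for-loop with early return, over range(0, len(s)-2, 2)
def outBeforeLoopA (cs : List Char) (b : Int) : List Int → Int → Bool
  | [], _ => false
  | i :: rest, pos =>
    let pos' :=
      if PySem.List.slice cs (some i) (some (i + 2)) = ['0', '0'] then pos + 1
      else if PySem.List.slice cs (some i) (some (i + 2)) = ['0', '1'] then pos - 1
      else pos
    if pos' ≥ b then true else outBeforeLoopA cs b rest pos'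

def out_before (s : String) (b : Int) : Bool :=
  outBeforeLoopA s.toList b (PySem.List.pyRange 0 (PySem.Str.len s - 2) 2) 0

-- ===== PORT B =====
-- d = 1 if c == '00' else (-1 if c == '01' else 0)
def outBeforeDelta (cs : List Char) (i : Int) : Int :=
  if PySem.List.slice cs (some i) (some (i + 2)) = ['0', '0'] then 1
  else if PySem.List.slice cs (some i) (some (i + 2)) = ['0', '1'] then -1
  else 0

-- the loop body: m = d if m is None else max(d, d + m)
def outBeforeStep (cs : List Char) (m : Option Int) (i : Int) : Option Int :=
  let d := outBeforeDelta cs i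
  match m with
  | none => some d
  | some r => some (max d (d + r))

def out_before_alt (s : String) (b : Int) : Bool :=
  let cs := s.toList
  let m := ((PySem.List.pyRange 0 (PySem.Str.len s - 2) 2).reverse).foldl
    (outBeforeStep cs) none
  match m with
  | none => false
  | some r => decide (r ≥ b)

-- ===== PRECONDITION & SPEC =====
def Spec_out_before (s : String) (b : Int) (out : Bool) : Prop := out = out_before_alt s b
instance (s : String) (b : Int) (out : Bool) : Decidable (Spec_out_before s b out) := by unfold Spec_out_before; infer_instance

-- ===== CLAIM (what is proved, stated in full; the proofs are below) =====
def Claim_equal_out_before : Prop := ∀ (s : String) (b : Int), Dom_out_before s b → Spec_out_before s b (out_before s b)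

-- ===== LEMMAS AND PROOFS =====
-- A's inline branch updates pos by exactly outBeforeDelta
theorem pv_delta_eq (cs : List Char) (i pos : Int) :
    (if PySem.List.slice cs (some i) (some (i + 2)) = ['0', '0'] then pos + 1
     else if PySem.List.slice cs (some i) (some (i + 2)) = ['0', '1'] then pos - 1
     else pos) = pos + outBeforeDelta cs i := by
  unfold outBeforeDelta; split_ifs <;> omega

-- A's early-exit loop equals "max nonempty-prefix sum reaches b", where the max
-- is computed by the right fold of outBeforeStep
theorem pv_loop_eq (cs : List Char) (b : Int) (idxs : List Int) (pos : Int) :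
    outBeforeLoopA cs b idxs pos
      = match idxs.foldr (fun i m => outBeforeStep cs m i) none with
        | none => false
        | some r => decide (pos + r ≥ b) := by
  induction idxs generalizing pos with
  | nil => simp [outBeforeLoopA]
  | cons i rest ih =>
    simp only [outBeforeLoopA, List.foldr, pv_delta_eq, ih]
    cases h : rest.foldr (fun i m => outBeforeStep cs m i) none with
    | none =>
      simp only [outBeforeStep]
      by_cases hb : pos + outBeforeDelta cs i ≥ b <;> simp [hb]
    | some r =>
      simp only [outBeforeStep]
      by_cases hb : pos + outBeforeDelta cs i ≥ b
      · simp only [if_pos hb]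
        have : pos + max (outBeforeDelta cs i) (outBeforeDelta cs i + r) ≥ b := by
          have := le_max_left (outBeforeDelta cs i) (outBeforeDelta cs i + r); omega
        simp [this]
      · simp only [if_neg hb]
        have : (pos + max (outBeforeDelta cs i) (outBeforeDelta cs i + r) ≥ b)
             ↔ (pos + outBeforeDelta cs i + r ≥ b) := by
          rcases max_choice (outBeforeDelta cs i) (outBeforeDelta cs i + r) with h' | h' <;>
            rw [h'] <;> omega
        simp [this]

-- ===== VERDICT (by name: the statement is the Claim_ definition above) =====
theorem out_before_spec : Claim_equal_out_before := by
  intro s b _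
  unfold Spec_out_before out_before out_before_alt
  simp only [List.foldl_reverse]
  rw [pv_loop_eq]
  cases (PySem.List.pyRange 0 (PySem.Str.len s - 2) 2).foldr
      (fun i m => outBeforeStep s.toList m i) none with
  | none => rfl
  | some r => simp
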